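-- pv_equiv track=rewrite | github.com/Meir-Tools/NoCrossTSP | 250313_tst_7_3_brut.py | recursive_permutations
-- ===== SOURCE A (Python) =====
-- def check_intersection(p1, p2, p3, p4):
--     """
--     פונקציה לבדוק אם יש הצטלבות בין שני קווים (p1,p2) ו-(p3,p4).
--     """
--     def ccw(a, b, c):
--         """פונקציה פנימית לבדיקת ccw - האם שלושה נקודות מסודרות נגד כיוון השעון."""
--         return (c[1] - a[1]) * (b[0] - a[0]) > (b[1] - a[1]) * (c[0] - a[0])
--
--     return ccw(p1, p3, p4) != ccw(p2, p3, p4) and ccw(p1, p2, p3) != ccw(p1, p2, p4)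
--
-- def recursive_permutations(points, path=[]):
--     # נבדוק אם יש הצטלבות בין קווים
--     for j in range(len(path)-3):
--         if check_intersection(path[j], path[j+1] , path[-2], path[-1] ):
--             return []
--
--
--     # אם כל הנקודות כבר במסלול, נחזיר אותו
--     if not points:
--         for j in range(len(path)-3):
--             if check_intersection(path[j+1], path[j+2] , path[-1], path[0] ):
--                 return []
--         return [path]
--
--     all_permutations = []
--
--     # עבור כל נקודה ברשימה, יוצרים את ההיתרים של שאר הנקודות
--     for i in range(len(points)):
--         current_point = points[i]
--         remaining_points = points[:i] + points[i+1:]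
--
--         # קריאה רקורסיבית תוך העברת המסלול המעודכן
--         all_permutations.extend(recursive_permutations(remaining_points, path + [current_point]))
--
--
--     return all_permutations
-- ===== SOURCE B (Python) =====
-- def check_intersection(p1, p2, p3, p4):
--     def ccw(a, b, c):
--         return (c[1] - a[1]) * (b[0] - a[0]) > (b[1] - a[1]) * (c[0] - a[0])
--     return ccw(p1, p3, p4) != ccw(p2, p3, p4) and ccw(p1, p2, p3) != ccw(p1, p2, p4)
--
-- def _crosses_tail(path):
--     # last edge (path[-2], path[-1]) against earlier edges, same quirky range as A
--     return any(check_intersection(path[j], path[j + 1], path[-2], path[-1])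
--                for j in range(len(path) - 3))
--
-- def _crosses_close(path):
--     # closing edge (path[-1], path[0]) against edges shifted by one, as in A
--     return any(check_intersection(path[j + 1], path[j + 2], path[-1], path[0])
--                for j in range(len(path) - 3))
--
-- def recursive_permutations(points, path=[]):
--     # breadth-first frontier expansion: all frames of one level share the same
--     # number of remaining points, so level order equals A's recursion order
--     frames = [(points, path)]
--     results = []
--     while frames:
--         next_frames = []
--         for pts, p in frames:
--             if _crosses_tail(p):
--                 continue
--             if not pts:
--                 if not _crosses_close(p):
--                     results.append(p)
--             else:
--                 for i in range(len(pts)):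
--                     next_frames.append((pts[:i] + pts[i + 1:], p + [pts[i]]))
--         frames = next_frames
--     return results
-- ===== Notes on version B (the rewrite author's own statement) =====
-- stated objective: alternative
-- what changed: Replaced the depth-first recursion by an iterative breadth-first frontier expansion over an explicit list of (remaining_points, path) frames; since all frames of a level share the same number of remaining points, the level-order output equals A's recursion order.
import Mathlib
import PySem

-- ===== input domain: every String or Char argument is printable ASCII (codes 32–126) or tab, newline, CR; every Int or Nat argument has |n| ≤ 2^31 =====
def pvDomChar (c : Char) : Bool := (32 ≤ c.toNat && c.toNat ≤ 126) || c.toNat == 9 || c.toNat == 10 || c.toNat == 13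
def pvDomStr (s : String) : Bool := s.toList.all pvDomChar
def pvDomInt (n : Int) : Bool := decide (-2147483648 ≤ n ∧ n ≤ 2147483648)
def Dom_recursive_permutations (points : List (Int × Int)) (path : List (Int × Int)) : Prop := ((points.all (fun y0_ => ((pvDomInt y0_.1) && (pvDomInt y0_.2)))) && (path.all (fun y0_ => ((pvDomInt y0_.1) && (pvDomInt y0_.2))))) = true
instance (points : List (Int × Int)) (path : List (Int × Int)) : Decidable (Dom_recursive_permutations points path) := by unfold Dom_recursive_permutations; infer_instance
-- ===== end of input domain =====

-- B replaces the depth-first recursion by an iterative breadth-first frontier of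
-- (remaining_points, path) frames; same output, same cost (objective: alternative).

-- ===== PORT A =====
-- check_intersection / ccw, shared module helpers used verbatim by both Pythons
def pvCcw (a b c : Int × Int) : Bool := decide ((c.2 - a.2) * (b.1 - a.1) > (b.2 - a.2) * (c.1 - a.1))

def pvCheckIntersection (p1 p2 p3 p4 : Int × Int) : Bool :=
  (pvCcw p1 p3 p4 != pvCcw p2 p3 p4) && (pvCcw p1 p2 p3 != pvCcw p1 p2 p4)

-- A's first pruning loop: indices j, j+1, len-2, len-1 are all in range whenever the
-- range is nonempty (len ≥ 4), so getD with a dummy default is Python-exact here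
def pvPrune1 (path : List (Int × Int)) : Bool :=
  (List.range (path.length - 3)).any fun j =>
    pvCheckIntersection (path.getD j (0, 0)) (path.getD (j + 1) (0, 0))
      (path.getD (path.length - 2) (0, 0)) (path.getD (path.length - 1) (0, 0))

-- A's closing-edge loop (path[-1], path[0]); same in-range argument
def pvPrune2 (path : List (Int × Int)) : Bool :=
  (List.range (path.length - 3)).any fun j =>
    pvCheckIntersection (path.getD (j + 1) (0, 0)) (path.getD (j + 2) (0, 0))
      (path.getD (path.length - 1) (0, 0)) (path.getD 0 (0, 0))

-- A's recursion, with fuel = points.length as the structural totality device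
-- (each recursive call removes exactly one point)
def pvRecA : Nat → List (Int × Int) → List (Int × Int) → List (List (Int × Int))
  | fuel, points, path =>
    if pvPrune1 path then []
    else
      match points with
      | [] => if pvPrune2 path then [] else [path]
      | _ :: _ =>
        match fuel with
        | 0 => []   -- unreachable: fuel = points.length at the top call
        | f + 1 =>
          (List.range points.length).foldl
            (fun acc i =>
              acc ++ pvRecA f (points.take i ++ points.drop (i + 1))
                       (path ++ [points.getD i (0, 0)])) []

def recursive_permutations (points : List (Int × Int)) (path : List (Int × Int)) : List (List (Int × Int)) :=
  pvRecA points.length points path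

-- ===== PORT B =====
-- one frame of Source B's frontier: (remaining points, path so far)
def pvStepFrame (st : List (List (Int × Int) × List (Int × Int)) × List (List (Int × Int)))
    (f : List (Int × Int) × List (Int × Int)) :
    List (List (Int × Int) × List (Int × Int)) × List (List (Int × Int)) :=
  if pvPrune1 f.2 then st
  else
    match f.1 with
    | [] => if pvPrune2 f.2 then st else (st.1, st.2 ++ [f.2])
    | _ :: _ =>
      (st.1 ++ (List.range f.1.length).map
          (fun i => (f.1.take i ++ f.1.drop (i + 1), f.2 ++ [f.1.getD i (0, 0)])), st.2)

-- one pass of the while-loop body over the current frontier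
def pvStepB (frames : List (List (Int × Int) × List (Int × Int))) (res : List (List (Int × Int))) :
    List (List (Int × Int) × List (Int × Int)) × List (List (Int × Int)) :=
  frames.foldl pvStepFrame ([], res)

-- the while-loop; fuel = points.length + 1 levels always suffices (proved below)
def pvLoopB : Nat → List (List (Int × Int) × List (Int × Int)) → List (List (Int × Int)) → List (List (Int × Int))
  | 0, _, res => res
  | f + 1, frames, res =>
    if frames = [] then res
    else
      let s := pvStepB frames res
      pvLoopB f s.1 s.2

def recursive_permutations_alt (points : List (Int × Int)) (path : List (Int × Int)) : List (List (Int × Int)) :=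
  pvLoopB (points.length + 1) [(points, path)] []

-- ===== PRECONDITION & SPEC =====
def Spec_recursive_permutations (points : List (Int × Int)) (path : List (Int × Int)) (out : List (List (Int × Int))) : Prop := out = recursive_permutations_alt points path
instance (points : List (Int × Int)) (path : List (Int × Int)) (out : List (List (Int × Int))) : Decidable (Spec_recursive_permutations points path out) := by unfold Spec_recursive_permutations; infer_instance

-- ===== CLAIM (what is proved, stated in full; the proofs are below) =====
def Claim_equal_recursive_permutations : Prop := ∀ (points : List (Int × Int)) (path : List (Int × Int)), Dom_recursive_permutations points path → Spec_recursive_permutations points path (recursive_permutations points path)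

-- ===== LEMMAS AND PROOFS =====

-- what one frame contributes to the next frontier
def pvChildrenOf (f : List (Int × Int) × List (Int × Int)) :
    List (List (Int × Int) × List (Int × Int)) :=
  if pvPrune1 f.2 then []
  else
    match f.1 with
    | [] => []
    | _ :: _ =>
      (List.range f.1.length).map
        (fun i => (f.1.take i ++ f.1.drop (i + 1), f.2 ++ [f.1.getD i (0, 0)]))

-- what one frame contributes to the results at this level
def pvResultOf (f : List (Int × Int) × List (Int × Int)) : List (List (Int × Int)) :=
  if pvPrune1 f.2 then []
  else
    match f.1 with
    | [] => if pvPrune2 f.2 then [] else [f.2]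
    | _ :: _ => []

lemma pvStep_foldl_spec (frames : List (List (Int × Int) × List (Int × Int)))
    (nf0 : List (List (Int × Int) × List (Int × Int))) (res0 : List (List (Int × Int))) :
    frames.foldl pvStepFrame (nf0, res0)
      = (nf0 ++ frames.flatMap pvChildrenOf, res0 ++ frames.flatMap pvResultOf) := by
  induction frames generalizing nf0 res0 with
  | nil => simp
  | cons f fs ih =>
    obtain ⟨pts, p⟩ := f
    simp only [List.foldl_cons, List.flatMap_cons]
    rw [show fs.foldl pvStepFrame (pvStepFrame (nf0, res0) (pts, p))
        = fs.foldl pvStepFrame ((pvStepFrame (nf0, res0) (pts, p)).1, (pvStepFrame (nf0, res0) (pts, p)).2) from rfl,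
      ih]
    unfold pvStepFrame pvChildrenOf pvResultOf
    cases pts with
    | nil => split_ifs <;> simp
    | cons x xs => split_ifs <;> simp

lemma pvLoopB_level (m : Nat) :
    ∀ (frames : List (List (Int × Int) × List (Int × Int))) (res : List (List (Int × Int))),
      (∀ f ∈ frames, f.1.length = m) →
      pvLoopB (m + 1) frames res = res ++ frames.flatMap (fun f => pvRecA m f.1 f.2) := by
  induction m with
  | zero =>
    intro frames res hlen
    by_cases hne : frames = []
    · simp [hne, pvLoopB]
    · rw [pvLoopB, if_neg hne]
      simp only [pvStepB, pvStep_foldl_spec, List.nil_append, pvLoopB]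
      congr 1
      apply List.flatMap_congr
      intro f hf
      have h0 : f.1.length = 0 := hlen f hf
      obtain ⟨pts, p⟩ := f
      cases pts with
      | nil => rfl
      | cons x xs => simp at h0
  | succ m ih =>
    intro frames res hlen
    by_cases hne : frames = []
    · simp [hne, pvLoopB]
    · rw [pvLoopB, if_neg hne]
      simp only [pvStepB, pvStep_foldl_spec, List.nil_append]
      -- no frame at this level has empty remaining points, so no results are produced here
      have hres : frames.flatMap pvResultOf = [] := by
        apply List.flatMap_eq_nil_iff.mpr
        intro f hf
        have hlf : f.1.length = m + 1 := hlen f hf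
        obtain ⟨pts, p⟩ := f
        cases pts with
        | nil => simp at hlf
        | cons x xs => simp only [pvResultOf]; split_ifs <;> rfl
      rw [hres, List.append_nil]
      -- every child frame has exactly m remaining points
      have hchild : ∀ g ∈ frames.flatMap pvChildrenOf, g.1.length = m := by
        intro g hg
        obtain ⟨f, hf, hgf⟩ := List.mem_flatMap.mp hg
        have hlf : f.1.length = m + 1 := hlen f hf
        obtain ⟨pts, p⟩ := f
        cases pts with
        | nil => simp at hlf
        | cons x xs =>
          simp only [pvChildrenOf] at hgf
          split_ifs at hgf with h1
          · simp at hgf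
          · simp only [List.mem_map, List.mem_range] at hgf
            obtain ⟨i, hi, rfl⟩ := hgf
            simp only [List.length_cons] at hlf hi
            simp only [List.length_append, List.length_take, List.length_drop, List.length_cons]
            omega
      rw [ih _ res hchild]
      congr 1
      rw [List.flatMap_assoc]
      apply List.flatMap_congr
      intro f hf
      have hlf : f.1.length = m + 1 := hlen f hf
      obtain ⟨pts, p⟩ := f
      cases pts with
      | nil => simp at hlf
      | cons x xs =>
        conv_rhs => rw [pvRecA.eq_def]
        simp only [pvChildrenOf]
        split_ifs with h1
        · simp
        · rw [PySem.List.foldl_append_eq_flatMap, List.flatMap_map]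
          simp

-- ===== VERDICT (by name: the statement is the Claim_ definition above) =====
theorem recursive_permutations_spec : Claim_equal_recursive_permutations := by
  intro points path _
  unfold Spec_recursive_permutations recursive_permutations recursive_permutations_alt
  rw [pvLoopB_level points.length [(points, path)] [] (by intro f hf; simp at hf; rw [hf])]
  simp
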